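-- pv_equiv track=rewrite | github.com/pypi-data/pypi-mirror-44 | packages/ramldocgen/ramldocgen-1.0.2.tar.gz/ramldocgen-1.0.2/ramldocgen/generator.py | idfirst
-- ===== SOURCE A (Python) =====
-- from collections import OrderedDict
--
-- def idfirst(od):
--     res = OrderedDict()
--     if 'id' in od:
--         res['id'] = od['id']
--     for k, v in od.items():
--         if k == 'id':
--             continue
--         res[k] = v
--     return res
-- ===== SOURCE B (Python) =====
-- from collections import OrderedDict
--
-- def idfirst(od):
--     # one stable sort pass: 'id' (key False) moves to the front, all else keeps order
--     return OrderedDict(sorted(od.items(), key=lambda kv: kv[0] != 'id'))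
-- ===== Notes on version B (the rewrite author's own statement) =====
-- stated objective: simpler
-- what changed: Replaces the membership guard plus skip-loop with a single expression: a stable sort keyed on (key != 'id'), which pulls the 'id' entry to the front while stability preserves every other entry's order.
import Mathlib
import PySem

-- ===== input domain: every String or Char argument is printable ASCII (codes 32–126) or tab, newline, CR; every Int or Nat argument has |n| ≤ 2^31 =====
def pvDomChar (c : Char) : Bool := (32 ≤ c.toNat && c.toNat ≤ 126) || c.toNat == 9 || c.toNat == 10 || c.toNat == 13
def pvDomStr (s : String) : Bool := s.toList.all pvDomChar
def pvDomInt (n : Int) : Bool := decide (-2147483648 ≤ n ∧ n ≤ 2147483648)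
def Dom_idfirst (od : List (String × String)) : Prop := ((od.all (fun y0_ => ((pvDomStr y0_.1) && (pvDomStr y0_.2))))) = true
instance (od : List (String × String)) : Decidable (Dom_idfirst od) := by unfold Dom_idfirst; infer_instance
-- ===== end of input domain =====

-- B reorders the dict with one stable sort keyed on (key != 'id') instead of A's guard + skip-loop.

-- ===== PORT A =====
def idfirst (od : List (String × String)) : List (String × String) :=
  let d : PySem.Dict String String := PySem.Dict.mk od
  let res0 : PySem.Dict String String :=
    if d.contains "id" then
      PySem.Dict.empty.insert "id" (d.getD "id" "")  -- guarded by the 'if': the "" default is never used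
    else PySem.Dict.empty
  let res := d.items.foldl
    (fun r kv => if kv.1 == "id" then r else r.insert kv.1 kv.2) res0
  res.items

-- ===== PORT B =====
def idfirst_alt (od : List (String × String)) : List (String × String) :=
  (PySem.Dict.ofList (PySem.List.sorted od (fun kv => kv.1 != "id"))).items

-- ===== PRECONDITION & SPEC =====
-- Pre_ excludes association lists with duplicate keys: the Python argument is a dict,
-- which cannot carry duplicate keys, so such lists represent no input A is ever run on.
def Pre_idfirst (od : List (String × String)) : Prop := (od.map Prod.fst).Nodup
instance (od : List (String × String)) : Decidable (Pre_idfirst od) := by unfold Pre_idfirst; infer_instance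

def pvWitness_idfirst : (List (String × String)) := [("b", "1"), ("id", "x"), ("c", "2")]

def Spec_idfirst (od : List (String × String)) (out : List (String × String)) : Prop := out = idfirst_alt od
instance (od : List (String × String)) (out : List (String × String)) : Decidable (Spec_idfirst od out) := by unfold Spec_idfirst; infer_instance

-- ===== CLAIM (what is proved, stated in full; the proofs are below) =====
def Claim_equal_idfirst : Prop := ∀ (od : List (String × String)), Dom_idfirst od → Pre_idfirst od → Spec_idfirst od (idfirst od)

-- ===== LEMMAS AND PROOFS =====

-- insertBy places x right after a prefix it does not go before, and before the rest
lemma insertBy_seg {α : Type} (before : α → α → Bool) (x : α) (A B : List α)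
    (hA : ∀ y ∈ A, before x y = false) (hB : ∀ y ∈ B, before x y = true) :
    PySem.List.insertBy before x (A ++ B) = A ++ x :: B := by
  induction A with
  | nil =>
    cases B with
    | nil => simp [PySem.List.insertBy]
    | cons b bs => simp [PySem.List.insertBy, hB b (by simp)]
  | cons a A ih =>
    have h0 : before x a = false := hA a (by simp)
    rw [List.cons_append]
    simp [PySem.List.insertBy, h0]
    exact ih (fun y hy => hA y (by simp [hy]))

-- stability of the Boolean-keyed insertion sort: the p-true block stays first, in order
lemma stable_fold {α : Type} (p : α → Bool) (xs A B : List α)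
    (hA : ∀ y ∈ A, p y = true) (hB : ∀ y ∈ B, p y = false) :
    xs.foldl (fun acc x => PySem.List.insertBy (fun a b => decide ((!p a) < (!p b))) x acc) (A ++ B)
      = (A ++ xs.filter p) ++ (B ++ xs.filter (fun x => !p x)) := by
  induction xs generalizing A B with
  | nil => simp
  | cons x xs ih =>
    by_cases hp : p x = true
    · have hins : PySem.List.insertBy (fun a b => decide ((!p a) < (!p b))) x (A ++ B)
          = (A ++ [x]) ++ B := by
        rw [insertBy_seg _ x A B
          (fun y hy => by simp [hp, hA y hy])
          (fun y hy => by simp [hp, hB y hy, Bool.lt_iff])]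
        simp
      simp only [List.foldl_cons, hins, ih (A ++ [x]) B
        (fun y hy => by rcases (List.mem_append.mp hy) with h | h
                        · exact hA y h
                        · simp at h; simp [h, hp]) hB]
      simp [hp]
    · have hp' : p x = false := by simpa using hp
      have hins : PySem.List.insertBy (fun a b => decide ((!p a) < (!p b))) x (A ++ B)
          = A ++ (B ++ [x]) := by
        rw [show A ++ (B ++ [x]) = (A ++ B) ++ [x] by simp]
        exact PySem.List.insertBy_of_forall_not_before _ x (A ++ B)
          (fun y hy => by simp [hp', Bool.lt_iff])
      simp only [List.foldl_cons, hins, ih A (B ++ [x]) hA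
        (fun y hy => by rcases (List.mem_append.mp hy) with h | h
                        · exact hB y h
                        · simp at h; simp [h, hp'])]
      simp [hp']

-- sorted with key (kv.1 != "id") = the "id" entries, then everything else, each in order
lemma sorted_key_split (od : List (String × String)) :
    PySem.List.sorted od (fun kv => kv.1 != "id")
      = od.filter (fun kv => kv.1 == "id") ++ od.filter (fun kv => !(kv.1 == "id")) := by
  have h := stable_fold (fun kv : String × String => kv.1 == "id") od [] []
    (by simp) (by simp)
  simpa [PySem.List.sorted_eq_foldl_insertBy] using h

-- ofList of a Nodup-keyed pair list returns exactly that list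
lemma ofList_items_of_nodup (l : List (String × String)) (h : (l.map Prod.fst).Nodup) :
    (PySem.Dict.ofList l).items = l := by
  have := PySem.Dict.items_foldl_insert_fresh l Prod.fst Prod.snd PySem.Dict.empty
    (fun a _ => by simp [PySem.Dict.contains_empty]) h
  simpa [PySem.Dict.ofList, PySem.Dict.update] using this

-- on a Nodup-keyed list, the "id"-filter is the first-match lookup
lemma filter_id_eq_lookup (od : List (String × String)) (h : (od.map Prod.fst).Nodup) :
    od.filter (fun kv => kv.1 == "id")
      = (match (PySem.Dict.mk od).get? "id" with
         | some v => [("id", v)]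
         | none => []) := by
  induction od with
  | nil => simp [PySem.Dict.get?]
  | cons kv rest ih =>
    obtain ⟨k, v⟩ := kv
    simp only [List.map_cons, List.nodup_cons] at h
    rw [List.filter_cons, PySem.Dict.get?_mk_cons]
    by_cases hk : (k == "id") = true
    · have hk' : k = "id" := by simpa using hk
      have : rest.filter (fun kv => kv.1 == "id") = [] := by
        rw [List.filter_eq_nil_iff]
        intro a ha
        have : a.1 ≠ "id" := fun e => h.1 (by rw [hk', ← e]; exact List.mem_map_of_mem ha)
        simpa using this
      simp [hk', this]
    · have hkf : (k == "id") = false := by simpa using hk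
      simp only [hkf, Bool.false_eq_true, if_false]
      exact ih h.2

-- A's result, computed: the looked-up "id" entry (if any) followed by the rest
lemma idfirst_eq (od : List (String × String)) (h : (od.map Prod.fst).Nodup) :
    idfirst od = od.filter (fun kv => kv.1 == "id") ++ od.filter (fun kv => !(kv.1 == "id")) := by
  unfold idfirst
  simp only []
  set d : PySem.Dict String String := PySem.Dict.mk od with hd
  -- d.items = od by rfl
  -- the loop skips "id" and inserts the rest
  have hstep : (fun (r : PySem.Dict String String) (kv : String × String) =>
        if kv.1 == "id" then r else r.insert kv.1 kv.2)
      = (fun r kv => if (!(kv.1 == "id")) = true then r.insert kv.1 kv.2 else r) := by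
    funext r kv
    by_cases hk : (kv.1 == "id") = true <;> simp [hk]
  set res0 : PySem.Dict String String :=
    if d.contains "id" then PySem.Dict.empty.insert "id" (d.getD "id" "") else PySem.Dict.empty
    with hres0
  have hG : ((od.filter (fun kv => !(kv.1 == "id"))).map Prod.fst).Nodup :=
    h.sublist (List.Sublist.map Prod.fst List.filter_sublist)
  have hfresh : ∀ a ∈ od.filter (fun kv => !(kv.1 == "id")), res0.contains a.1 = false := by
    intro a ha
    have ha' : (a.1 == "id") = false := by
      have := (List.mem_filter.mp ha).2; simpa using this
    rw [hres0]
    by_cases hc : d.contains "id" = true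
    · simp [hc, PySem.Dict.contains_insert, PySem.Dict.contains_empty, ha']
    · simp [Bool.eq_false_iff.mpr hc, PySem.Dict.contains_empty]
  rw [hstep, PySem.List.foldl_if_eq_foldl_filter,
      PySem.Dict.items_foldl_insert_fresh _ Prod.fst Prod.snd res0 hfresh hG]
  have hres0items : res0.items = od.filter (fun kv => kv.1 == "id") := by
    rw [filter_id_eq_lookup od h, hres0]
    rcases hg : (PySem.Dict.mk od).get? "id" with _ | v
    · have hc : d.contains "id" = false := by
        rw [PySem.Dict.contains_eq_isSome_get?, hd, hg]; rfl
      rw [if_neg (by simp [hc])]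
      rfl
    · have hc : d.contains "id" = true := by
        rw [PySem.Dict.contains_eq_isSome_get?, hd, hg]; rfl
      have hgd : d.getD "id" "" = v := PySem.Dict.getD_of_get?_eq_some d "" hg
      rw [if_pos hc, hgd]
      rfl
  rw [hres0items]
  simp

-- ===== VERDICT (by name: the statement is the Claim_ definition above) =====
theorem idfirst_spec : Claim_equal_idfirst := by
  intro od _ hpre
  unfold Spec_idfirst idfirst_alt
  have hsplit := sorted_key_split od
  have hnd : ((od.filter (fun kv => kv.1 == "id") ++ od.filter (fun kv => !(kv.1 == "id"))).map Prod.fst).Nodup := by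
    have hperm := (List.filter_append_perm (fun kv : String × String => kv.1 == "id") od).map Prod.fst
    exact hperm.nodup_iff.mpr hpre
  rw [hsplit, ofList_items_of_nodup _ hnd, idfirst_eq od hpre]
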